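-- pv_equiv track=rewrite | github.com/jxadhd/UC-COSC121-24S1 | 5/Module/Mod5.py | num_rushes
-- ===== SOURCE A (Python) =====
-- def num_rushes(slope_height, rush_height_gain, back_sliding):
--     """Calculates the number of rushes Herbert needs to reach the top of the slope."""
--     current_height = 0
--     num_rushes = 0
--
--     while current_height < slope_height:
--         num_rushes += 1
--         current_height += rush_height_gain  # Herbert rushes up the slope
--
--         # Check if Herbert has reached or exceeded the slope height
--         if current_height >= slope_height:
--             break  # Herbert has reached the top, no need to slide back
--
--         current_height -= back_sliding  # Slope settles, Herbert slides back
--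
--     return num_rushes
-- ===== SOURCE B (Python) =====
-- def num_rushes(slope_height, rush_height_gain, back_sliding):
--     """Number of rushes to the top, computed by a closed-form ceiling division."""
--     if slope_height <= 0:
--         return 0
--     net = rush_height_gain - back_sliding
--     # highest point reached during/after a rush (break checks before slideback, so
--     # with negative back_sliding the post-slide height can be the higher one)
--     peak = max(rush_height_gain, net)
--     if peak >= slope_height:
--         return 1
--     return 1 + -(-(slope_height - peak) // net)
-- ===== Notes on version B (the rewrite author's own statement) =====
-- stated objective: alternative
-- what changed: Replaces A's rush-by-rush simulation loop with a closed-form ceiling-division formula (first rush's peak height, then ceiling division of the remaining height by the net gain per rush); Pre_ excludes only the inputs (positive slope, no first-rush success, non-positive net gain) on which A's loop never terminates.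
import Mathlib
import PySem

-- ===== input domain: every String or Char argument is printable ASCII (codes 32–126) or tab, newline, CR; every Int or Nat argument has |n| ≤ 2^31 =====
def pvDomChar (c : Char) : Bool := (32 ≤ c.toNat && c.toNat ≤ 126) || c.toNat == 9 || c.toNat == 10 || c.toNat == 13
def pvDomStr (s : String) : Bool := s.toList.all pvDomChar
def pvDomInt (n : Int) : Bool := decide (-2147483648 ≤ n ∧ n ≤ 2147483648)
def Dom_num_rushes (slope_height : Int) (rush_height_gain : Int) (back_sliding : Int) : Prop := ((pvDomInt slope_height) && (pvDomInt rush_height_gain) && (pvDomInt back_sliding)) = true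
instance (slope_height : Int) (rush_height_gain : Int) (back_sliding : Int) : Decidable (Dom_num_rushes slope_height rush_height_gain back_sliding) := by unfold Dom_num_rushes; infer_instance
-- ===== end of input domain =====

-- B replaces A's rush-by-rush simulation loop with a closed-form ceiling-division formula.

-- ===== PORT A =====
-- A's while loop, made total with fuel; under Pre_ the fuel (slope_height.toNat + 1)
-- is never exhausted, so this computes exactly what A's loop computes.
def numRushesGo (slope gain back : Int) : Nat → Int → Int → Int
  | 0, _, n => n
  | fuel+1, h, n =>
    if h < slope then
      let h' := h + gain
      if slope ≤ h' then n + 1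
      else numRushesGo slope gain back fuel (h' - back) (n + 1)
    else n

def num_rushes (slope_height : Int) (rush_height_gain : Int) (back_sliding : Int) : Int :=
  numRushesGo slope_height rush_height_gain back_sliding (slope_height.toNat + 1) 0 0

-- ===== PORT B =====
def num_rushes_alt (slope_height : Int) (rush_height_gain : Int) (back_sliding : Int) : Int :=
  if slope_height ≤ 0 then 0
  else
    let net := rush_height_gain - back_sliding
    let peak := max rush_height_gain net
    if slope_height ≤ peak then 1
    else 1 + -(PySem.Int.floordiv (-(slope_height - peak)) net)

-- ===== PRECONDITION & SPEC =====
-- Pre_ excludes exactly the inputs on which A's while loop never terminates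
-- (positive slope not reachable in one rush and no positive net gain per rush).
def Pre_num_rushes (slope_height : Int) (rush_height_gain : Int) (back_sliding : Int) : Prop :=
  slope_height ≤ 0 ∨ slope_height ≤ rush_height_gain ∨ back_sliding < rush_height_gain
instance (slope_height : Int) (rush_height_gain : Int) (back_sliding : Int) : Decidable (Pre_num_rushes slope_height rush_height_gain back_sliding) := by unfold Pre_num_rushes; infer_instance

def pvWitness_num_rushes : Int × Int × Int := (10, 3, 1)

def Spec_num_rushes (slope_height : Int) (rush_height_gain : Int) (back_sliding : Int) (out : Int) : Prop := out = num_rushes_alt slope_height rush_height_gain back_sliding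
instance (slope_height : Int) (rush_height_gain : Int) (back_sliding : Int) (out : Int) : Decidable (Spec_num_rushes slope_height rush_height_gain back_sliding out) := by unfold Spec_num_rushes; infer_instance

-- ===== CLAIM (what is proved, stated in full; the proofs are below) =====
def Claim_equal_num_rushes : Prop := ∀ (slope_height : Int) (rush_height_gain : Int) (back_sliding : Int), Dom_num_rushes slope_height rush_height_gain back_sliding → Pre_num_rushes slope_height rush_height_gain back_sliding → Spec_num_rushes slope_height rush_height_gain back_sliding (num_rushes slope_height rush_height_gain back_sliding)

-- ===== LEMMAS AND PROOFS =====

-- ceiling division -((-x) // net) for positive net: base and step cases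
theorem cdiv_base {x net : Int} (hnet : 0 < net) (_h1 : 1 ≤ x) (_h2 : x ≤ net) :
    -(PySem.Int.floordiv (-x) net) = 1 := by
  rw [PySem.Int.neg_floordiv_neg_eq_iff_of_pos hnet]
  constructor <;> omega

theorem cdiv_step {x net : Int} (hnet : 0 < net) (h1 : net < x) :
    -(PySem.Int.floordiv (-x) net) = 1 + -(PySem.Int.floordiv (-(x - net)) net) := by
  set q := -(PySem.Int.floordiv (-(x - net)) net) with hq
  have hch : (q - 1) * net < x - net ∧ x - net ≤ q * net :=
    (PySem.Int.neg_floordiv_neg_eq_iff_of_pos hnet).mp hq.symm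
  rw [PySem.Int.neg_floordiv_neg_eq_iff_of_pos hnet]
  constructor <;> nlinarith [hch.1, hch.2]

-- Loop invariant: with positive net gain, the loop from height h (below the top)
-- with enough fuel returns the accumulator plus the closed-form remaining count.
-- peak abstracts max gain (gain-back) so every side condition is linear arithmetic.
theorem go_closed (slope gain back peak : Int) (hb : back < gain)
    (hp1 : gain ≤ peak) (hp2 : gain - back ≤ peak)
    (hp3 : peak = gain ∨ peak = gain - back) :
    ∀ (fuel : Nat) (h n : Int), h < slope → (slope - h).toNat ≤ fuel →
      numRushesGo slope gain back fuel h n =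
        n + (if slope ≤ h + peak then 1
             else 1 + -(PySem.Int.floordiv (-(slope - h - peak)) (gain - back))) := by
  intro fuel
  induction fuel with
  | zero => intro h n hh hf; omega
  | succ fuel ih =>
    intro h n hh hf
    have hnet : 0 < gain - back := by omega
    simp only [numRushesGo, if_pos hh]
    by_cases hbrk : slope ≤ h + gain
    · rw [if_pos hbrk, if_pos (by omega)]
    · rw [if_neg hbrk]
      by_cases hnext : slope ≤ h + (gain - back)
      · -- next while-check exits: total count is n+1
        rw [if_pos (by omega : slope ≤ h + peak)]
        cases fuel with
        | zero => simp only [numRushesGo]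
        | succ fuel' =>
          simp only [numRushesGo, if_neg (show ¬ h + gain - back < slope by omega)]
      · have hpk : ¬ slope ≤ h + peak := by rcases hp3 with hc | hc <;> omega
        rw [if_neg hpk]
        rw [ih (h + gain - back) (n + 1) (by omega) (by omega)]
        by_cases hx : slope ≤ (h + gain - back) + peak
        · rw [if_pos hx, cdiv_base hnet (by omega) (by omega)]
          ring
        · rw [if_neg hx]
          have harg : (slope - (h + gain - back) - peak)
              = (slope - h - peak) - (gain - back) := by ring
          rw [harg, ← cdiv_step hnet (by omega)]
          ring

-- ===== VERDICT (by name: the statement is the Claim_ definition above) =====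
theorem num_rushes_spec : Claim_equal_num_rushes := by
  intro s g b _ hpre
  unfold Spec_num_rushes num_rushes num_rushes_alt
  by_cases hs : s ≤ 0
  · have h0 : s.toNat = 0 := by omega
    rw [h0, if_pos hs]
    simp only [numRushesGo]
    rw [if_neg (by omega)]
  · rw [if_neg hs]
    have hml := le_max_left g (g - b)
    have hmr := le_max_right g (g - b)
    have hmc := max_choice g (g - b)
    by_cases hg : s ≤ max g (g - b)
    · rw [if_pos hg]
      by_cases hb : s ≤ g
      · -- break on the very first rush
        obtain ⟨k, hk⟩ : ∃ k, s.toNat + 1 = k + 1 := ⟨s.toNat, rfl⟩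
        rw [hk]
        simp only [numRushesGo]
        rw [if_pos (by omega), if_pos (by omega)]
        omega
      · -- peak = g - b ≥ s: loop exits at second while-check; need b < g from Pre_
        have hbg : b < g := by rcases hpre with h | h | h <;> omega
        rw [go_closed s g b (max g (g - b)) hbg hml hmr hmc (s.toNat + 1) 0 0
          (by omega) (by omega), if_pos (by omega)]
        ring
    · rw [if_neg hg]
      have hbg : b < g := by rcases hpre with h | h | h <;> omega
      rw [go_closed s g b (max g (g - b)) hbg hml hmr hmc (s.toNat + 1) 0 0
        (by omega) (by omega), if_neg (by omega)]
      ring_nf
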